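-- pv_equiv track=rewrite | github.com/weichert/squadvault | scripts/_patch_ops_fix_pairing_gate_cta_placement_v4.py | strip_cta_blocks
-- ===== SOURCE A (Python) =====
-- CTA_LINE = 'echo "=== NEXT: Fix patcher/wrapper pairing failures ==="'
--
-- def strip_cta_blocks(lines: list[str]) -> tuple[list[str], int]:
--     """
--     Remove any CTA block(s) by detecting the CTA_LINE and skipping until the next blank-line echo.
--     This avoids regex greed and won't eat unrelated lines.
--     """
--     out: list[str] = []
--     i = 0
--     removed = 0
--
--     while i < len(lines):
--         line = lines[i]
--
--         if CTA_LINE in line: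
--             removed += 1
--
--             # If there's an immediately preceding `echo` blank line, remove it too (optional cleanup).
--             if out and out[-1].strip() == "echo":
--                 out.pop()
--
--             # Skip forward through the CTA block until we hit a blank-line echo *after* CTA_LINE.
--             i += 1
--             while i < len(lines):
--                 if lines[i].strip() == "echo":
--                     i += 1
--                     break
--                 i += 1
--             continue
--
--         out.append(line)
--         i += 1
--
--     return out, removed
-- ===== SOURCE B (Python) =====
-- CTA_LINE = 'echo "=== NEXT: Fix patcher/wrapper pairing failures ==="'
--
-- def strip_cta_blocks(lines: list[str]) -> tuple[list[str], int]:
--     # Phase 1: cut the input into the kept segments, one cut per CTA block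
--     # (each block runs from the CTA line through the next blank-line echo).
--     segments: list[list[str]] = []
--     rest = lines
--     while True:
--         i = next((k for k, l in enumerate(rest) if CTA_LINE in l), None)
--         if i is None:
--             segments.append(rest)
--             break
--         segments.append(rest[:i])
--         j = next((k for k in range(i + 1, len(rest)) if rest[k].strip() == "echo"), None)
--         rest = [] if j is None else rest[j + 1:]
--     # Phase 2: join the segments, popping one trailing blank-line echo at each junction.
--     out = segments[0]
--     for seg in segments[1:]:
--         if out and out[-1].strip() == "echo":
--             out = out[:-1]
--         out = out + seg
--     return out, len(segments) - 1
-- ===== Notes on version B (the rewrite author's own statement) =====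
-- stated objective: alternative
-- what changed: Replaces A's single index-driven scan (with a nested skip-ahead inner loop) by a two-phase algorithm: phase 1 cuts the input into kept segments via find-next-CTA/find-next-echo plus list slicing, phase 2 joins the segments with a fold that pops one trailing blank-line echo at each junction; removed is the number of cuts.
import Mathlib
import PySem

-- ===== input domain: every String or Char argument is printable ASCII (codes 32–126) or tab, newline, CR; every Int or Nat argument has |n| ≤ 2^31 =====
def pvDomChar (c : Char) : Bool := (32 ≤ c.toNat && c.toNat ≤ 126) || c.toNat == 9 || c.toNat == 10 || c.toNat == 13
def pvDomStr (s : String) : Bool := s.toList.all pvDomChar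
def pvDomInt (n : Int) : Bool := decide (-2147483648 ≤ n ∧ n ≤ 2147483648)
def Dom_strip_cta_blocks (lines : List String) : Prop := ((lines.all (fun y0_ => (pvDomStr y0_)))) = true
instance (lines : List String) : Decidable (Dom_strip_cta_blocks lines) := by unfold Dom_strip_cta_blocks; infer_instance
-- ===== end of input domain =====

-- B replaces A's one-pass index-driven scan (with a nested skip-ahead loop) by a two-phase
-- algorithm: first cut the input into kept segments (find-next-CTA + find-next-echo + slices),
-- then join the segments popping one trailing blank-line echo at each junction; objective: alternative.

-- helpers shared by both ports (the identical comparisons both Pythons perform)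
def pvCtaLine : String := "echo \"=== NEXT: Fix patcher/wrapper pairing failures ===\""
def pvIsCta (l : String) : Bool := PySem.Str.isIn pvCtaLine l
def pvIsEcho (l : String) : Bool := PySem.Str.strip l == "echo"
-- `if out and out[-1].strip() == "echo": pop/[: -1]` — identical in both Pythons
def pvPopEcho (out : List String) : List String :=
  match out.getLast? with
  | some t => if pvIsEcho t then out.dropLast else out
  | none => out

-- ===== PORT A =====
-- inner `while i < len(lines): if lines[i].strip()=="echo": i+=1; break; i+=1` — suffix after the consumed echo
def pvSkipEchoA : List String → List String
  | [] => []
  | l :: ls => if pvIsEcho l then ls else pvSkipEchoA ls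

theorem pvSkipEchoA_length_le (ls : List String) : (pvSkipEchoA ls).length ≤ ls.length := by
  induction ls with
  | nil => simp [pvSkipEchoA]
  | cons l ls ih =>
    simp only [pvSkipEchoA]
    split
    · simp
    · simp only [List.length_cons]; omega

def pvGoA : List String → List String → Int → List String × Int
  | [], out, removed => (out, removed)
  | l :: ls, out, removed =>
    if pvIsCta l then
      pvGoA (pvSkipEchoA ls) (pvPopEcho out) (removed + 1)
    else
      pvGoA ls (out ++ [l]) removed
  termination_by ls _ _ => ls.length
  decreasing_by
  · exact Nat.lt_succ_of_le (by simpa using pvSkipEchoA_length_le ls)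
  · simp

def strip_cta_blocks (lines : List String) : List String × Int := pvGoA lines [] 0

-- ===== PORT B =====
-- termination fact for pvSegs (cited in its decreasing_by)
theorem pvFindIdx?_lt {α : Type} (p : α → Bool) (xs : List α) (i : Nat)
    (h : xs.findIdx? p = some i) : i < xs.length := by
  induction xs generalizing i with
  | nil => simp at h
  | cons x xs ih =>
    rw [List.findIdx?_cons] at h
    split at h
    · simp only [Option.some_inj] at h; subst h; simp
    · simp only [Option.map_eq_some_iff] at h
      obtain ⟨j, hj, hji⟩ := h
      have := ih j hj; simp; omega

-- `j = next((k for k in range(i+1,len(rest)) if rest[k].strip()=="echo"), None); rest = [] if j is None else rest[j+1:]`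
def pvAfterBlock (rest : List String) (i : Nat) : List String :=
  match (rest.drop (i + 1)).findIdx? pvIsEcho with
  | none => []
  | some j => (rest.drop (i + 1)).drop (j + 1)

-- phase 1: the kept segments, one cut per CTA block
def pvSegs (rest : List String) : List (List String) :=
  match h : rest.findIdx? pvIsCta with
  | none => [rest]
  | some i => rest.take i :: pvSegs (pvAfterBlock rest i)
  termination_by rest.length
  decreasing_by
    have hi := pvFindIdx?_lt pvIsCta rest i h
    unfold pvAfterBlock
    split
    · simp only [List.length_nil]; omega
    · simp only [List.length_drop]; omega

-- phase 2: join the segments, popping one trailing blank-line echo at each junction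
def pvStepJoin (out : List String) (seg : List String) : List String := pvPopEcho out ++ seg

def strip_cta_blocks_alt (lines : List String) : List String × Int :=
  ((match pvSegs lines with
    | [] => []
    | s :: rest => rest.foldl pvStepJoin s),
   ((pvSegs lines).length : Int) - 1)

-- ===== PRECONDITION & SPEC =====
def Spec_strip_cta_blocks (lines : List String) (out : List String × Int) : Prop := out = strip_cta_blocks_alt lines
instance (lines : List String) (out : List String × Int) : Decidable (Spec_strip_cta_blocks lines out) := by unfold Spec_strip_cta_blocks; infer_instance

-- ===== CLAIM (what is proved, stated in full; the proofs are below) =====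
def Claim_equal_strip_cta_blocks : Prop := ∀ (lines : List String), Dom_strip_cta_blocks lines → Spec_strip_cta_blocks lines (strip_cta_blocks lines)

-- ===== LEMMAS AND PROOFS =====

theorem pvSegs_ne_nil (ls : List String) : pvSegs ls ≠ [] := by
  rw [pvSegs]
  split <;> simp

-- A's inner skip loop computes exactly B's find-echo-then-slice
theorem pvSkipEchoA_eq_find (ls : List String) :
    pvSkipEchoA ls = (match ls.findIdx? pvIsEcho with
                      | none => []
                      | some j => ls.drop (j + 1)) := by
  induction ls with
  | nil => simp [pvSkipEchoA]
  | cons l ls ih =>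
    rw [List.findIdx?_cons]
    by_cases h : pvIsEcho l
    · simp [pvSkipEchoA, h]
    · simp only [pvSkipEchoA, h, Bool.false_eq_true, if_false, ih]
      cases ls.findIdx? pvIsEcho <;> simp

-- when no line contains the CTA, A just copies
theorem pvGoA_noCta (ls : List String) (h : ls.findIdx? pvIsCta = none) :
    ∀ (out : List String) (r : Int), pvGoA ls out r = (out ++ ls, r) := by
  induction ls with
  | nil => intro out r; simp [pvGoA]
  | cons l ls ih =>
    intro out r
    rw [List.findIdx?_cons] at h
    split at h
    · simp at h
    · rename_i hl
      simp only [Option.map_eq_none_iff] at h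
      rw [pvGoA, if_neg (by simp [hl]), ih h]
      simp

-- when the first CTA is at index i, A jumps to the block's end with the prefix appended (echo popped)
theorem pvGoA_cta (ls : List String) : ∀ (i : Nat), ls.findIdx? pvIsCta = some i →
    ∀ (out : List String) (r : Int),
    pvGoA ls out r = pvGoA (pvAfterBlock ls i) (pvPopEcho (out ++ ls.take i)) (r + 1) := by
  induction ls with
  | nil => intro i h; simp at h
  | cons l ls ih =>
    intro i h out r
    rw [List.findIdx?_cons] at h
    split at h
    · rename_i hl
      simp only [Option.some_inj] at h
      subst h
      rw [pvGoA, if_pos hl]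
      simp only [pvAfterBlock, List.take_zero, List.append_nil, List.drop_succ_cons, List.drop_zero]
      rw [pvSkipEchoA_eq_find]
    · rename_i hl
      simp only [Option.map_eq_some_iff] at h
      obtain ⟨j, hj, hji⟩ := h
      subst hji
      rw [pvGoA, if_neg (by simp [hl]), ih j hj (out ++ [l]) r]
      simp only [pvAfterBlock, List.drop_succ_cons, List.take_succ_cons, List.append_assoc,
        List.singleton_append]

-- main invariant: A's scan equals B's fold over the segments
theorem pvGoA_segs (n : Nat) : ∀ (ls : List String), ls.length ≤ n →
    ∀ (out : List String) (r : Int),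
    pvGoA ls out r = ((pvSegs ls).tail.foldl pvStepJoin (out ++ (pvSegs ls).headD []),
                      r + ((pvSegs ls).tail.length : Int)) := by
  induction n with
  | zero =>
    intro ls hls out r
    have : ls = [] := List.length_eq_zero_iff.mp (Nat.le_zero.mp hls)
    subst this
    rw [pvSegs]
    simp [pvGoA]
  | succ n ih =>
    intro ls hls out r
    rw [pvSegs]
    split
    · rename_i h
      simp only [List.tail_cons, List.headD_cons, List.foldl_nil, List.length_nil]
      rw [pvGoA_noCta ls h]
      simp
    · rename_i i h
      simp only [List.tail_cons, List.headD_cons]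
      rw [pvGoA_cta ls i h out r]
      have hi := pvFindIdx?_lt pvIsCta ls i h
      have hlen : (pvAfterBlock ls i).length ≤ n := by
        unfold pvAfterBlock
        split
        · simp
        · simp only [List.length_drop]; omega
      rw [ih (pvAfterBlock ls i) hlen (pvPopEcho (out ++ ls.take i)) (r + 1)]
      cases hseg : pvSegs (pvAfterBlock ls i) with
      | nil => exact absurd hseg (pvSegs_ne_nil _)
      | cons s rest =>
        simp only [List.tail_cons, List.headD_cons, List.foldl_cons, List.length_cons, pvStepJoin,
          Prod.mk.injEq, true_and]
        push_cast; ring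

-- ===== VERDICT (by name: the statement is the Claim_ definition above) =====
theorem strip_cta_blocks_spec : Claim_equal_strip_cta_blocks := by
  intro lines _
  unfold Spec_strip_cta_blocks strip_cta_blocks strip_cta_blocks_alt
  rw [pvGoA_segs lines.length lines le_rfl [] 0]
  cases hseg : pvSegs lines with
  | nil => exact absurd hseg (pvSegs_ne_nil _)
  | cons s rest =>
    simp only [List.tail_cons, List.headD_cons, List.nil_append, List.length_cons,
      Prod.mk.injEq, true_and]
    push_cast; ring
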